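-- pv_equiv track=rewrite | github.com/kosiew/alfred-workflows | process_text.py | _is_covered_by
-- ===== SOURCE A (Python) =====
-- def _is_covered_by(prev_key, new_key):
--     prev_cfg, prev_pub, prev_paths = prev_key
--     new_cfg, new_pub, new_paths = new_key
--     if prev_cfg != new_cfg or prev_pub != new_pub:
--         return False
--
--     for new_item in new_paths:
--         covered = False
--         for prev_item in prev_paths:
--             if prev_item == new_item:
--                 covered = True
--                 break
--             if prev_item.endswith("::*"):
--                 prefix = prev_item[:-3]
--                 if new_item == prefix or new_item.startswith(prefix + "::"):
--                     covered = True
--                     break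
--         if not covered:
--             return False
--     return True
-- ===== SOURCE B (Python) =====
-- def _is_covered_by(prev_key, new_key):
--     prev_cfg, prev_pub, prev_paths = prev_key
--     new_cfg, new_pub, new_paths = new_key
--     if (prev_cfg, prev_pub) != (new_cfg, new_pub):
--         return False
--     exact = set(prev_paths)
--     wild = {p[:-3] for p in prev_paths if p.endswith("::*")}
--     for item in new_paths:
--         if item in exact or item in wild:
--             continue
--         if any(item[i:i+2] == "::" and item[:i] in wild
--                for i in range(len(item) - 1)):
--             continue
--         return False
--     return True
-- ===== Notes on version B (the rewrite author's own statement) =====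
-- stated objective: alternative
-- what changed: B replaces A's per-new-item linear scan of prev_paths (with per-candidate endswith/startswith tests) by a prebuilt set of exact paths and a set of wildcard prefixes, checking each new item and its '::'-ancestor prefixes against those sets; it trades A's early-exit scan for hash lookups, so it is not measurably faster on the benchmarked inputs.
import Mathlib
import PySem

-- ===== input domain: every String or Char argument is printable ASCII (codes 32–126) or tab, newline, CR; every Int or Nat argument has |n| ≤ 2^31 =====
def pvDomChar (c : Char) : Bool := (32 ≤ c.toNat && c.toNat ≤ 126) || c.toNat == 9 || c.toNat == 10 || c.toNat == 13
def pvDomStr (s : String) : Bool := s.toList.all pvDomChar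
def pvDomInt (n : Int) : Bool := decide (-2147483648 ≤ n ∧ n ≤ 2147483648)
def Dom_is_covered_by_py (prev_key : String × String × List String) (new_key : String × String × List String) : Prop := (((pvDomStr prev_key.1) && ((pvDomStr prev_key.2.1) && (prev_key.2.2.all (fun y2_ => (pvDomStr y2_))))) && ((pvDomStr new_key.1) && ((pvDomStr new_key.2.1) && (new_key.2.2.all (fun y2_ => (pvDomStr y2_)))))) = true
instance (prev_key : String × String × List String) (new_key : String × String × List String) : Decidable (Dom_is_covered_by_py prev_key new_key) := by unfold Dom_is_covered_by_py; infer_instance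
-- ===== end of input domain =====

-- B replaces A's nested scan of prev_paths per new item by a set of exact paths plus a set
-- of wildcard prefixes, checking each new item's "::"-ancestor prefixes against them
-- (an alternative, index-based algorithm). String operations are ported exactly at the
-- code-point (List Char) level via PySem.Chars.

-- ===== PORT A =====
-- inner 'for prev_item in prev_paths' loop of A (covered-flag with break = first hit wins)
def pvInnerA (ni : List Char) : List (List Char) → Bool
  | [] => false
  | p :: rest =>
    if p == ni then true
    else if PySem.Chars.endswith p [':', ':', '*'] then
      let pre := PySem.Chars.slice p none (some (-3))
      if ni == pre || PySem.Chars.startswith ni (pre ++ [':', ':']) then true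
      else pvInnerA ni rest
    else pvInnerA ni rest

-- outer 'for new_item in new_paths' loop of A ('if not covered: return False')
def pvOuterA (prev : List (List Char)) : List (List Char) → Bool
  | [] => true
  | ni :: rest => if !(pvInnerA ni prev) then false else pvOuterA prev rest

def is_covered_by_py (prev_key : String × String × List String) (new_key : String × String × List String) : Bool :=
  if prev_key.1 != new_key.1 || prev_key.2.1 != new_key.2.1 then false
  else pvOuterA (prev_key.2.2.map String.toList) (new_key.2.2.map String.toList)

-- ===== PORT B =====
-- {p[:-3] for p in prev_paths if p.endswith("::*")}, as the list the set is built from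
def pvWildList (prev : List (List Char)) : List (List Char) :=
  prev.filterMap (fun p =>
    if PySem.Chars.endswith p [':', ':', '*'] then
      some (PySem.Chars.slice p none (some (-3)))
    else none)

-- per-item check of B: exact hit, whole-item wildcard hit, or an ancestor prefix hit
def pvItemB (exact wild : PySem.Set (List Char)) (item : List Char) : Bool :=
  PySem.Set.contains exact item || PySem.Set.contains wild item ||
    (PySem.List.pyRange 0 ((item.length : Int) - 1) 1).any (fun i =>
      PySem.Chars.slice item (some i) (some (i + 2)) == [':', ':'] &&
      PySem.Set.contains wild (PySem.Chars.slice item none (some i)))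

def is_covered_by_py_alt (prev_key : String × String × List String) (new_key : String × String × List String) : Bool :=
  if (prev_key.1, prev_key.2.1) != (new_key.1, new_key.2.1) then false
  else
    let exact := PySem.Set.ofList (prev_key.2.2.map String.toList)
    let wild := PySem.Set.ofList (pvWildList (prev_key.2.2.map String.toList))
    (new_key.2.2.map String.toList).all (fun item => pvItemB exact wild item)

-- ===== PRECONDITION & SPEC =====
def Spec_is_covered_by_py (prev_key : String × String × List String) (new_key : String × String × List String) (out : Bool) : Prop := out = is_covered_by_py_alt prev_key new_key
instance (prev_key : String × String × List String) (new_key : String × String × List String) (out : Bool) : Decidable (Spec_is_covered_by_py prev_key new_key out) := by unfold Spec_is_covered_by_py; infer_instance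

-- ===== CLAIM (what is proved, stated in full; the proofs are below) =====
def Claim_equal_is_covered_by_py : Prop := ∀ (prev_key : String × String × List String) (new_key : String × String × List String), Dom_is_covered_by_py prev_key new_key → Spec_is_covered_by_py prev_key new_key (is_covered_by_py prev_key new_key)

-- ===== LEMMAS AND PROOFS =====

-- A's inner loop is an existential scan
theorem pvInnerA_eq_any (ni : List Char) (prev : List (List Char)) :
    pvInnerA ni prev = prev.any (fun p =>
      p == ni || (PySem.Chars.endswith p [':', ':', '*'] &&
        (ni == PySem.Chars.slice p none (some (-3)) ||
         PySem.Chars.startswith ni (PySem.Chars.slice p none (some (-3)) ++ [':', ':'])))) := by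
  induction prev with
  | nil => rfl
  | cons p rest ih =>
      simp only [pvInnerA, List.any_cons]
      split_ifs with h1 h2 h3 <;> simp_all

-- A's outer loop is List.all
theorem pvOuterA_eq_all (prev news : List (List Char)) :
    pvOuterA prev news = news.all (fun ni => pvInnerA ni prev) := by
  induction news with
  | nil => rfl
  | cons ni rest ih =>
      simp only [pvOuterA, List.all_cons, ih]
      cases pvInnerA ni prev <;> simp

-- the two slice forms B uses, as take/drop
theorem pv_sliceB_eq (ni : List Char) (j : Nat) :
    PySem.Chars.slice ni (some (j : Int)) (some ((j : Int) + 2)) = (ni.drop j).take 2 := by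
  rw [show ((j : Int) + 2) = ((j : Nat) : Int) + ((2 : Nat) : Int) by push_cast; ring]
  rw [PySem.Chars.slice_eq_listSlice, PySem.List.slice_natCast_add]

theorem pv_sliceTo_eq (ni : List Char) (j : Nat) :
    PySem.Chars.slice ni none (some (j : Int)) = ni.take j := by
  rw [PySem.Chars.slice_eq_listSlice, PySem.List.slice_to_natCast]

-- 'ni starts with q ++ "::"' iff some index j < len-1 has "::" at j and prefix q before it
theorem pv_startswith_colon_iff (ni q : List Char) :
    PySem.Chars.startswith ni (q ++ [':', ':']) = true ↔
      ∃ j : Nat, (j : Int) < (ni.length : Int) - 1 ∧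
        (ni.drop j).take 2 = [':', ':'] ∧ ni.take j = q := by
  rw [PySem.Chars.startswith_iff]
  constructor
  · rintro ⟨t, ht⟩
    refine ⟨q.length, ?_, ?_, ?_⟩
    · subst ht; simp; omega
    · subst ht; simp
    · subst ht; simp
  · rintro ⟨j, hj, hdrop, htake⟩
    refine ⟨(ni.drop j).drop 2, ?_⟩
    have h2 : ni.drop j = [':', ':'] ++ (ni.drop j).drop 2 := by
      conv_lhs => rw [← List.take_append_drop 2 (ni.drop j)]
      rw [hdrop]
    conv_rhs => rw [← List.take_append_drop j ni, htake, h2]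
    rw [List.append_assoc]

-- membership in the wildcard-prefix list
theorem pv_mem_wildList (prev : List (List Char)) (q : List Char) :
    q ∈ pvWildList prev ↔ ∃ p ∈ prev,
      PySem.Chars.endswith p [':', ':', '*'] = true ∧
      PySem.Chars.slice p none (some (-3)) = q := by
  simp only [pvWildList, List.mem_filterMap]
  constructor
  · rintro ⟨p, hp, hq⟩
    by_cases h : PySem.Chars.endswith p [':', ':', '*'] = true
    · rw [if_pos h] at hq
      exact ⟨p, hp, h, Option.some.inj hq⟩
    · rw [if_neg h] at hq
      cases hq
  · rintro ⟨p, hp, h, hq⟩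
    exact ⟨p, hp, by rw [if_pos h, hq]⟩

-- Set.contains on a built set is list membership
theorem pv_contains_ofList (l : List (List Char)) (x : List Char) :
    PySem.Set.contains (PySem.Set.ofList l) x = true ↔ x ∈ l := by
  rw [PySem.Set.contains_iff, PySem.Set.mem_ofList]

-- the per-item equivalence: A's inner scan = B's set-based check
theorem pv_item_eq (prev : List (List Char)) (ni : List Char) :
    pvInnerA ni prev =
      pvItemB (PySem.Set.ofList prev) (PySem.Set.ofList (pvWildList prev)) ni := by
  rw [Bool.eq_iff_iff, pvInnerA_eq_any]
  simp only [pvItemB, List.any_eq_true, Bool.or_eq_true, Bool.and_eq_true, beq_iff_eq,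
    pv_contains_ofList, pv_mem_wildList, PySem.List.mem_pyRange_one]
  constructor
  · rintro ⟨p, hp, h | ⟨hend, h | h⟩⟩
    · exact Or.inl (Or.inl (h ▸ hp))
    · exact Or.inl (Or.inr ⟨p, hp, hend, h.symm⟩)
    · rw [pv_startswith_colon_iff] at h
      rcases h with ⟨j, hj, hdrop, htake⟩
      refine Or.inr ⟨(j : Int), ⟨by positivity, hj⟩, ?_, p, hp, hend, ?_⟩
      · rw [pv_sliceB_eq]; exact hdrop
      · rw [pv_sliceTo_eq, htake]
  · rintro ((h | ⟨p, hp, hend, hq⟩) | ⟨i, ⟨hi0, hi1⟩, hslice, p, hp, hend, hq⟩)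
    · exact ⟨ni, h, Or.inl rfl⟩
    · exact ⟨p, hp, Or.inr ⟨hend, Or.inl hq.symm⟩⟩
    · obtain ⟨j, rfl⟩ : ∃ j : Nat, i = (j : Int) := ⟨i.toNat, (Int.toNat_of_nonneg hi0).symm⟩
      rw [pv_sliceB_eq] at hslice
      rw [pv_sliceTo_eq] at hq
      refine ⟨p, hp, Or.inr ⟨hend, Or.inr ?_⟩⟩
      rw [hq, pv_startswith_colon_iff]
      exact ⟨j, hi1, hslice, rfl⟩

-- the tuple guard of B equals the disjunctive guard of A
theorem pv_guard_eq (a b c d : String) :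
    ((a != c || b != d) : Bool) = ((a, b) != (c, d)) := by
  have h : ((a, b) == (c, d)) = (a == c && b == d) := rfl
  simp [bne, h, Bool.not_and]

-- ===== VERDICT (by name: the statement is the Claim_ definition above) =====
theorem is_covered_by_py_spec : Claim_equal_is_covered_by_py := by
  intro pk nk _
  unfold Spec_is_covered_by_py is_covered_by_py is_covered_by_py_alt
  rw [← pv_guard_eq]
  split_ifs with h
  · rfl
  · simp only [pvOuterA_eq_all, pv_item_eq]
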